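-- pv_equiv track=rewrite | github.com/Jy-27/Thunder | utils.py | _text_to_decimal
-- ===== SOURCE A (Python) =====
-- def _text_to_decimal(text: str) -> int:
--     """문자열을 10진수(int)로 변환 (맨 앞자리가 0이 되지 않도록 처리)"""
--     if not text:
--         raise ValueError("입력 문자열이 비어 있습니다.")
--
--     decimal_str = f"{ord(text[0])}"  # 첫 번째 문자는 그대로 사용
--     decimal_str += "".join(
--         f"{ord(char) + 1000}" for char in text[1:]
--     )  # 이후 문자는 +1000 처리
--
--     return int(decimal_str)  # 정수(int)로 변환
-- ===== SOURCE B (Python) =====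
-- def _text_to_decimal(text: str) -> int:
--     """문자열을 10진수(int)로 변환 (맨 앞자리가 0이 되지 않도록 처리)"""
--     if not text:
--         raise ValueError("입력 문자열이 비어 있습니다.")
--
--     result = ord(text[0])  # first character: plain ord value
--     for char in text[1:]:
--         v = ord(char) + 1000
--         result = result * 10 ** len(str(v)) + v  # shift by v's digit width, then add
--     return result
-- ===== Notes on version B (the rewrite author's own statement) =====
-- stated objective: alternative
-- what changed: B drops A's decimal-string concatenation and int() re-parse and instead accumulates the same number arithmetically with a Horner-style fold (result = result * 10**len(str(v)) + v per character).
import Mathlib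
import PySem

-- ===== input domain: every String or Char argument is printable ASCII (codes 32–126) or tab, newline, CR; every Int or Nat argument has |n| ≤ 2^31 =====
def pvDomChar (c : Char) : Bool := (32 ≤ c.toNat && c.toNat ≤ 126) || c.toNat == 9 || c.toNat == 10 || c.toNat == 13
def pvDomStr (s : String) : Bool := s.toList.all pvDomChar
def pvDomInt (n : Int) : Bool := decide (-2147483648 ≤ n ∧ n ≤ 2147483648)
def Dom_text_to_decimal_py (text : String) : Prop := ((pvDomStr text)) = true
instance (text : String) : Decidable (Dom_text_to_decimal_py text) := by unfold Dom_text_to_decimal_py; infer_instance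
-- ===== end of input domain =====

-- B replaces A's build-a-decimal-string-and-int()-parse with a direct Horner-style
-- arithmetic accumulator over the same per-character values (objective: alternative;
-- same O(n) passes, no string round-trip).


-- ===== PORT A =====
-- `text[0]`/`text[1:]` on a nonempty string are head/tail of its char list;
-- f"{n}" is PySem.Int.toChars, "".join is PySem.Chars.join [], int() is PySem.Int.ofChars?
-- (the parse always succeeds on the built digit string, so the `.getD 0` default is never taken).
def text_to_decimal_py (text : String) : Int :=
  match text.toList with
  | [] => 0
  | c :: rest =>
      let decimalStr : List Char :=
        PySem.Int.toChars ((c.toNat : Int)) ++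
          PySem.Chars.join [] (rest.map (fun ch => PySem.Int.toChars ((ch.toNat : Int) + 1000)))
      (PySem.Int.ofChars? decimalStr).getD 0

-- ===== PORT B =====
def text_to_decimal_py_alt (text : String) : Int :=
  match text.toList with
  | [] => 0
  | c :: rest =>
      rest.foldl (fun acc ch =>
        let v : Int := (ch.toNat : Int) + 1000
        acc * 10 ^ (PySem.Int.toChars v).length + v) ((c.toNat : Int))

-- ===== PRECONDITION & SPEC =====
-- A raises ValueError on the empty string; Pre_ excludes exactly that input.
def Pre_text_to_decimal_py (text : String) : Prop := text ≠ ""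
instance (text : String) : Decidable (Pre_text_to_decimal_py text) := by unfold Pre_text_to_decimal_py; infer_instance
def pvWitness_text_to_decimal_py : String := "a"

def Spec_text_to_decimal_py (text : String) (out : Int) : Prop := out = text_to_decimal_py_alt text
instance (text : String) (out : Int) : Decidable (Spec_text_to_decimal_py text out) := by unfold Spec_text_to_decimal_py; infer_instance

-- ===== CLAIM =====
def Claim_equal_text_to_decimal_py : Prop := ∀ (text : String), Dom_text_to_decimal_py text → Pre_text_to_decimal_py text → Spec_text_to_decimal_py text (text_to_decimal_py text)

-- ===== LEMMAS AND PROOFS =====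

/-- One Horner step of Python's decimal parser: consume digit `c` into accumulator `a`. -/
def pvStep (a : Nat) (c : Char) : Nat := a * 10 + (c.toNat - '0'.toNat)

/-- `str(n)` for a natural number, via Mathlib's `Nat.digits` (most significant first). -/
def pvRepr (n : Nat) : List Char :=
  if n = 0 then ['0'] else ((Nat.digits 10 n).map Nat.digitChar).reverse

/-- The whitespace-stripping `int()` performs before parsing. -/
def pvCleanup (s : List Char) : List Char :=
  (List.dropWhile PySem.Int.isIntSpace (List.dropWhile PySem.Int.isIntSpace s).reverse).reverse

/-- The outer shape of `PySem.Int.ofChars?`, with the digit parser abstracted as `v`. -/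
def pvTemplate (v : List Char → Option Nat) (s : List Char) : Option Int :=
  match pvCleanup s with
  | '-' :: ds => Option.map (fun n => -n) do
      let a ← v ds
      pure ((a : Int))
  | '+' :: ds => Option.map (fun n => n) do
      let a ← v ds
      pure ((a : Int))
  | ds => Option.map (fun n => n) do
      let a ← v ds
      pure ((a : Int))

/-- Capture of the (private, hence unnameable) digit parser inside `PySem.Int.ofChars?`
    together with its defining equations: every component is `rfl`, and elaborating them in
    order pins the existential witnesses by unification (`h` via the cons case of the parser,
    then `g` via the instance `h '5' cs`, whose head reduces to the recursive worker). -/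
theorem pvParserPack : ∃ (v : List Char → Option Nat) (h : Char → List Char → Option Nat)
    (g : List Char → Bool → Nat → Option Nat),
    (∀ s, PySem.Int.ofChars? s = pvTemplate v s) ∧
    (∀ c cs, v (c :: cs) = h c cs) ∧
    (∀ cs, h '5' cs = g cs true 5) ∧
    (∀ b acc, g [] b acc = if b = true then some acc else none) ∧
    (∀ c rest b acc, g (c :: rest) b acc =
      if c.isDigit = true then g rest true (acc * 10 + (c.toNat - '0'.toNat))
      else if c = '_' ∧ b = true then
        (match rest with
         | d :: _ => if d.isDigit = true then g rest false acc else none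
         | [] => none)
      else none) ∧
    (∀ c cs, h c cs = g (c :: cs) false 0) := by
  refine ⟨_, _, _, fun s => rfl, fun c cs => rfl, fun cs => rfl, ?_, ?_, ?_⟩
  · exact fun b acc => rfl
  · exact fun c rest b acc => rfl
  · exact fun c cs => rfl

theorem pvIsIntSpace_of_digit {c : Char} (h : c.isDigit = true) : PySem.Int.isIntSpace c = false := by
  have h0 : '0' ≤ c ∧ c ≤ '9' := by
    simpa [Char.isDigit, decide_eq_true_eq] using h
  simp only [PySem.Int.isIntSpace, Bool.or_eq_false_iff, decide_eq_false_iff_not]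
  refine ⟨⟨⟨⟨⟨?_, ?_⟩, ?_⟩, ?_⟩, ?_⟩, ?_⟩ <;>
    rintro rfl <;> revert h0 <;> decide

theorem pvDropWhile_digits {cs : List Char} (h : ∀ c ∈ cs, c.isDigit = true) :
    List.dropWhile PySem.Int.isIntSpace cs = cs := by
  cases cs with
  | nil => rfl
  | cons c cs' =>
      simp [pvIsIntSpace_of_digit (h c (by simp))]

theorem pvCleanup_digits {cs : List Char} (h : ∀ c ∈ cs, c.isDigit = true) :
    pvCleanup cs = cs := by
  unfold pvCleanup
  rw [pvDropWhile_digits h, pvDropWhile_digits (by simpa using fun c hc => h c hc),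
    List.reverse_reverse]

/-- `int()` on a nonempty all-digit string returns its Horner value. -/
theorem pvParse_digits {cs : List Char} (hne : cs ≠ []) (h : ∀ c ∈ cs, c.isDigit = true) :
    PySem.Int.ofChars? cs = some ((cs.foldl pvStep 0 : Nat) : Int) := by
  obtain ⟨v, h, g, h1, h2, _, h3, h4, h5⟩ := pvParserPack
  have hg : ∀ (ds : List Char) (b : Bool) (acc : Nat), (∀ c ∈ ds, c.isDigit = true) →
      (ds = [] → b = true) → g ds b acc = some (ds.foldl pvStep acc) := by
    intro ds
    induction ds with
    | nil => intro b acc _ hb; rw [h3, hb rfl]; simp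
    | cons c ds' ih =>
        intro b acc hd _
        rw [h4, if_pos (hd c (by simp))]
        exact ih true (pvStep acc c) (fun x hx => hd x (by simp [hx])) (fun _ => rfl)
  cases cs with
  | nil => exact absurd rfl hne
  | cons c cs' =>
      have hc := h c (by simp)
      rw [h1]
      unfold pvTemplate
      rw [pvCleanup_digits h]
      have hgv : v (c :: cs') = some ((c :: cs').foldl pvStep 0) := by
        rw [h2, h5]; exact hg (c :: cs') false 0 h (by simp)
      split
      · rename_i ds heq
        exfalso
        have : c = '-' := by injection heq
        subst this; revert hc; decide
      · rename_i ds heq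
        exfalso
        have : c = '+' := by injection heq
        subst this; revert hc; decide
      · rename_i heq1 heq2
        rw [hgv]
        rfl

theorem pvDigitChar_isDigit {d : Nat} (h : d < 10) : (Nat.digitChar d).isDigit = true := by
  interval_cases d <;> decide

theorem pvDigitChar_val {d : Nat} (h : d < 10) : (Nat.digitChar d).toNat - '0'.toNat = d := by
  interval_cases d <;> decide

theorem pvRepr_digits (n : Nat) : ∀ c ∈ pvRepr n, c.isDigit = true := by
  intro c hc
  unfold pvRepr at hc
  split at hc
  · simp at hc; subst hc; decide
  · simp only [List.mem_reverse, List.mem_map] at hc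
    obtain ⟨d, hd, rfl⟩ := hc
    exact pvDigitChar_isDigit (Nat.digits_lt_base (by norm_num) hd)

theorem pvRepr_ne_nil (n : Nat) : pvRepr n ≠ [] := by
  unfold pvRepr
  split
  · simp
  · simp [Nat.digits_ne_nil_iff_ne_zero, *]

theorem pvRepr_small {n : Nat} (h : n < 10) : pvRepr n = [Nat.digitChar (n % 10)] := by
  by_cases h0 : n = 0
  · subst h0; rfl
  · unfold pvRepr
    rw [if_neg h0, Nat.digits_def' (by norm_num) (Nat.pos_of_ne_zero h0),
      Nat.div_eq_of_lt h, Nat.digits_zero]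
    rfl

theorem pvRepr_succ {n : Nat} (h : 10 ≤ n) :
    pvRepr n = pvRepr (n / 10) ++ [Nat.digitChar (n % 10)] := by
  have h10 : n / 10 ≠ 0 := by
    have := Nat.div_le_div_right (c := 10) h
    simp at this
    omega
  unfold pvRepr
  rw [if_neg (by omega), if_neg h10,
    Nat.digits_def' (by norm_num) (by omega : 0 < n)]
  simp

theorem pvToDigitsCore_eq (fuel : Nat) : ∀ (n : Nat) (sfx : List Char), n < fuel →
    Nat.toDigitsCore 10 fuel n sfx = pvRepr n ++ sfx := by
  induction fuel with
  | zero => intro n _ h; omega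
  | succ fuel ih =>
      intro n sfx h
      rw [Nat.toDigitsCore]
      by_cases h10 : n / 10 = 0
      · rw [if_pos h10, pvRepr_small (by omega)]
        rfl
      · rw [if_neg h10, ih (n / 10) _ (by omega)]
        conv_rhs => rw [pvRepr_succ (by omega)]
        simp

theorem pvToChars_eq (m : Nat) : PySem.Int.toChars ((m : Int)) = pvRepr m := by
  unfold PySem.Int.toChars
  rw [if_neg (by omega)]
  show Nat.toDigits 10 (Int.toNat (m : Int)) = pvRepr m
  rw [Nat.toDigits, Int.toNat_natCast, pvToDigitsCore_eq (m + 1) m [] (by omega)]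
  simp

/-- Folding the parser step over `str(n)` starting from `acc` shifts and adds. -/
theorem pvFoldl_step_repr (n : Nat) : ∀ acc : Nat,
    (pvRepr n).foldl pvStep acc = acc * 10 ^ (pvRepr n).length + n := by
  induction n using Nat.strong_induction_on with
  | _ n ih =>
      intro acc
      by_cases hn : n < 10
      · rw [pvRepr_small hn]
        simp only [List.foldl_cons, List.foldl_nil, List.length_cons, List.length_nil]
        unfold pvStep
        rw [pvDigitChar_val (Nat.mod_lt _ (by norm_num))]
        have : n % 10 = n := Nat.mod_eq_of_lt hn
        rw [this]; ring
      · rw [pvRepr_succ (by omega), List.foldl_append, List.length_append,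
          ih (n / 10) (by omega) acc]
        simp only [List.foldl_cons, List.foldl_nil, List.length_cons, List.length_nil]
        unfold pvStep
        rw [pvDigitChar_val (Nat.mod_lt _ (by norm_num))]
        have hdm : n = 10 * (n / 10) + n % 10 := (Nat.div_add_mod n 10).symm ▸ by omega
        rw [pow_add]
        ring_nf
        omega

theorem pvJoin_flatten (parts : List (List Char)) : PySem.Chars.join [] parts = parts.flatten := by
  induction parts with
  | nil => rfl
  | cons p ps ih =>
      cases ps with
      | nil => simp [PySem.Chars.join, List.intercalate]
      | cons q qs =>
          rw [PySem.Chars.join_cons_cons, List.flatten_cons, ← ih]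
          simp

/-- B's per-character step, at the `Nat` level. -/
def pvStepB (a : Nat) (ch : Char) : Nat :=
  a * 10 ^ (pvRepr (ch.toNat + 1000)).length + (ch.toNat + 1000)

theorem pvFoldl_blocks (rest : List Char) : ∀ m : Nat,
    ((rest.map (fun ch => pvRepr (ch.toNat + 1000))).flatten).foldl pvStep m
      = rest.foldl pvStepB m := by
  induction rest with
  | nil => intro m; simp
  | cons ch rest ih =>
      intro m
      rw [List.map_cons, List.flatten_cons, List.foldl_append, pvFoldl_step_repr,
        List.foldl_cons, ih]
      unfold pvStepB
      rfl

theorem pvAltFold_cast (rest : List Char) : ∀ m : Nat,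
    rest.foldl (fun acc ch =>
        acc * 10 ^ (PySem.Int.toChars ((ch.toNat : Int) + 1000)).length + ((ch.toNat : Int) + 1000))
      ((m : Int)) = ((rest.foldl pvStepB m : Nat) : Int) := by
  induction rest with
  | nil => intro m; rfl
  | cons ch rest ih =>
      intro m
      rw [List.foldl_cons, List.foldl_cons]
      have hcast : ((ch.toNat : Int) + 1000) = ((ch.toNat + 1000 : Nat) : Int) := by push_cast; ring
      rw [hcast, pvToChars_eq]
      have : ((m : Int)) * 10 ^ (pvRepr (ch.toNat + 1000)).length + ((ch.toNat + 1000 : Nat) : Int)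
          = ((pvStepB m ch : Nat) : Int) := by
        unfold pvStepB; push_cast; ring
      rw [this, ih]

theorem pvMain (c : Char) (rest : List Char) :
    (PySem.Int.ofChars? (PySem.Int.toChars ((c.toNat : Int)) ++
        PySem.Chars.join [] (rest.map (fun ch => PySem.Int.toChars ((ch.toNat : Int) + 1000))))).getD 0
      = rest.foldl (fun acc ch =>
          acc * 10 ^ (PySem.Int.toChars ((ch.toNat : Int) + 1000)).length + ((ch.toNat : Int) + 1000))
        ((c.toNat : Int)) := by
  have hblk : ∀ ch : Char, PySem.Int.toChars ((ch.toNat : Int) + 1000) = pvRepr (ch.toNat + 1000) := by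
    intro ch
    have : ((ch.toNat : Int) + 1000) = ((ch.toNat + 1000 : Nat) : Int) := by push_cast; ring
    rw [this, pvToChars_eq]
  have hS : PySem.Int.toChars ((c.toNat : Int)) ++
        PySem.Chars.join [] (rest.map (fun ch => PySem.Int.toChars ((ch.toNat : Int) + 1000)))
      = pvRepr c.toNat ++ (rest.map (fun ch => pvRepr (ch.toNat + 1000))).flatten := by
    rw [pvToChars_eq]
    congr 1
    rw [funext hblk, pvJoin_flatten]
  rw [hS]
  have hdig : ∀ x ∈ pvRepr c.toNat ++ (rest.map (fun ch => pvRepr (ch.toNat + 1000))).flatten,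
      x.isDigit = true := by
    intro x hx
    rcases List.mem_append.mp hx with hx | hx
    · exact pvRepr_digits _ x hx
    · obtain ⟨l, hl, hxl⟩ := List.mem_flatten.mp hx
      obtain ⟨ch, _, rfl⟩ := List.mem_map.mp hl
      exact pvRepr_digits _ x hxl
  have hne : pvRepr c.toNat ++ (rest.map (fun ch => pvRepr (ch.toNat + 1000))).flatten ≠ [] := by
    intro hcontra
    exact pvRepr_ne_nil c.toNat (List.append_eq_nil_iff.mp hcontra).1
  rw [pvParse_digits hne hdig, Option.getD_some, List.foldl_append, pvFoldl_step_repr,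
    pvFoldl_blocks]
  have h0 : 0 * 10 ^ (pvRepr c.toNat).length + c.toNat = c.toNat := by ring
  rw [h0]
  rw [funext hblk] at *
  exact (pvAltFold_cast rest c.toNat).symm

-- ===== VERDICT (by name: the statement is the Claim_ definition above) =====
theorem text_to_decimal_py_spec : Claim_equal_text_to_decimal_py := by
  intro text _ hpre
  unfold Spec_text_to_decimal_py text_to_decimal_py text_to_decimal_py_alt
  cases htl : text.toList with
  | nil =>
      exact absurd (String.toList_eq_nil_iff.mp htl) hpre
  | cons c rest => exact pvMain c rest
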